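-- pv_equiv track=rewrite | github.com/NicoAdams/data-science-final | util.py | splitListOn
-- ===== SOURCE A (Python) =====
-- def splitListOn(l, splitString):
--     """ Splits each string in a list, then joins all results into a single list
--     Eg. ["a:b", "c:d"], ":" -> ["a", ":b", "c", ":d"]
--     """
--     newList = []
--     for item in l:
--         isplit = item.split(splitString)
--         for i in range(len(isplit)):
--             toAdd = isplit[i]
--             if i > 0:
--                 toAdd = splitString + toAdd
--             newList.append(toAdd)
--     return newList
-- ===== SOURCE B (Python) =====
-- def splitListOn(l, splitString):
--     """ Splits each string in a list, then joins all results into a single list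
--     Eg. ["a:b", "c:d"], ":" -> ["a", ":b", "c", ":d"]
--     Single character-scan per string: tokens (each non-first one carrying its
--     leading delimiter) are built directly, without str.split + re-prepending.
--     """
--     if not splitString:
--         raise ValueError("empty separator")
--     out = []
--     n = len(splitString)
--     for item in l:
--         cur = ""
--         i = 0
--         while i < len(item):
--             if item.startswith(splitString, i):
--                 out.append(cur)
--                 cur = splitString
--                 i += n
--             else:
--                 cur += item[i]
--                 i += 1
--         out.append(cur)
--     return out
-- ===== Notes on version B (the rewrite author's own statement) =====
-- stated objective: alternative
-- what changed: Replaces str.split followed by an indexed loop that re-prepends the delimiter with a single left-to-right character scan that emits each token (with its leading delimiter already attached) as it is recognised.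
-- outside the precondition, e.g. on splitListOn([], ''): A returns [], B raises ValueError
import Mathlib
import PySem

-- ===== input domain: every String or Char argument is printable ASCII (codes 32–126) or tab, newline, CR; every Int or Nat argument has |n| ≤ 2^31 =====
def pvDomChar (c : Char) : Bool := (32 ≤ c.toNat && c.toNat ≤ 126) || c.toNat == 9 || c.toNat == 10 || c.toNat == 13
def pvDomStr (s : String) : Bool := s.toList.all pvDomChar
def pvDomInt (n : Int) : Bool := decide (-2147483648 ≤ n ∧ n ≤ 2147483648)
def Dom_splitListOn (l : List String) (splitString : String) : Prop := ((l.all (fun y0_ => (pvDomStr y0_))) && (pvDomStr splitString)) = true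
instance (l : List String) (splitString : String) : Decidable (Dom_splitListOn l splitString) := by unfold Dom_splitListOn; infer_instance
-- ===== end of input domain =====

-- B replaces str.split + an indexed delimiter-re-prepending loop by a single character scan
-- that emits each token with its leading delimiter already attached (objective: alternative).

-- ===== PORT A =====
-- item.split(splitString): under Pre_ (splitString ≠ ""), this is PySem.Chars.splitOn on the
-- character lists (the sep ≠ "" form of PySem.Str.split?).
def splitListOn (l : List String) (splitString : String) : List String :=
  l.foldl (fun newList item =>
    let isplit : List String := (PySem.Chars.splitOn item.toList splitString.toList).map String.ofList
    (PySem.List.pyRange 0 isplit.length 1).foldl (fun acc i =>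
      let toAdd := PySem.List.pyGetD isplit i ""
      let toAdd := if 0 < i then splitString ++ toAdd else toAdd
      acc ++ [toAdd]) newList) []

-- ===== PORT B =====
-- B's inner while-loop: a scan over the remaining characters of item (the suffix item[i:]);
-- cur is the token being built, out the output list so far.
def altGo (sep : List Char) (hsep : sep ≠ []) (s : List Char) (cur : List Char)
    (out : List (List Char)) : List (List Char) :=
  match s with
  | [] => out ++ [cur]
  | c :: rest =>
    if sep.isPrefixOf (c :: rest) then
      altGo sep hsep (List.drop sep.length (c :: rest)) sep (out ++ [cur])
    else
      altGo sep hsep rest (cur ++ [c]) out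
termination_by s.length
decreasing_by
  all_goals cases sep with
  | nil => exact absurd rfl hsep
  | cons a t => simp only [List.length_cons, List.length_drop]; omega

def splitListOn_alt (l : List String) (splitString : String) : List String :=
  if h : splitString.toList = [] then []   -- B raises ValueError here (outside Pre_)
  else (l.foldl (fun out item => altGo splitString.toList h item.toList [] out) []).map String.ofList

-- ===== PRECONDITION & SPEC =====
-- Pre_ excludes splitString = "": there Python's str.split raises ValueError (A raises unless l = [],
-- the vacuous case where A returns [] before ever splitting; B checks the separator first and raises).
def Pre_splitListOn (l : List String) (splitString : String) : Prop := splitString ≠ ""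
instance (l : List String) (splitString : String) : Decidable (Pre_splitListOn l splitString) := by
  unfold Pre_splitListOn; infer_instance
def pvWitness_splitListOn : List String × String := (["a:b", "c:d"], ":")

def Spec_splitListOn (l : List String) (splitString : String) (out : List String) : Prop := out = splitListOn_alt l splitString
instance (l : List String) (splitString : String) (out : List String) : Decidable (Spec_splitListOn l splitString out) := by unfold Spec_splitListOn; infer_instance

-- ===== CLAIM (what is proved, stated in full; the proofs are below) =====
def Claim_equal_splitListOn : Prop := ∀ (l : List String) (splitString : String), Dom_splitListOn l splitString → Pre_splitListOn l splitString → Spec_splitListOn l splitString (splitListOn l splitString)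

-- ===== LEMMAS AND PROOFS =====

-- Reference splitter (proof-only): Python's s.split(sep) for sep ≠ "", structurally.
def pysplit (sep : List Char) (hsep : sep ≠ []) (s : List Char) : List (List Char) :=
  match s with
  | [] => [[]]
  | c :: rest =>
    if sep.isPrefixOf (c :: rest) then [] :: pysplit sep hsep (List.drop sep.length (c :: rest))
    else
      match pysplit sep hsep rest with
      | [] => [[c]]
      | p :: ps => (c :: p) :: ps
termination_by s.length
decreasing_by
  all_goals cases sep with
  | nil => exact absurd rfl hsep
  | cons a t => simp only [List.length_cons, List.length_drop]; omega

theorem pysplit_ne_nil (sep : List Char) (hsep : sep ≠ []) (s : List Char) :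
    pysplit sep hsep s ≠ [] := by
  match s with
  | [] => simp [pysplit]
  | c :: rest =>
    rw [pysplit]
    split
    · simp
    · cases hd : pysplit sep hsep rest with
      | nil => simp
      | cons p ps => simp

theorem splitOn_go_eq (sep : List Char) (hsep : sep ≠ []) :
    ∀ (fuel : Nat) (s : List Char), s.length < fuel → ∀ (cur : List Char) (acc : List (List Char)),
      PySem.Chars.splitOn.go sep fuel s cur acc =
        acc.reverse ++ (cur.reverse ++ (pysplit sep hsep s).headI) :: (pysplit sep hsep s).tail := by
  intro fuel
  induction fuel with
  | zero => intro s hs; omega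
  | succ n ih =>
    intro s hs cur acc
    match s with
    | [] =>
      simp [PySem.Chars.splitOn.go, pysplit]
    | c :: rest =>
      rw [PySem.Chars.splitOn.go]
      unfold pysplit
      split
      · rename_i hpre
        rw [ih _ (by
          have : 1 ≤ sep.length := by cases sep with | nil => exact absurd rfl hsep | cons a t => simp
          simp at hs ⊢; omega)]
        have hne := pysplit_ne_nil sep hsep (List.drop sep.length (c :: rest))
        cases hd : pysplit sep hsep (List.drop sep.length (c :: rest)) with
        | nil => exact absurd hd hne
        | cons p ps => simp
      · rw [ih _ (by simp at hs ⊢; omega)]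
        have hne := pysplit_ne_nil sep hsep rest
        cases hd : pysplit sep hsep rest with
        | nil => exact absurd hd hne
        | cons p ps => simp

theorem splitOn_eq_pysplit (sep : List Char) (hsep : sep ≠ []) (s : List Char) :
    PySem.Chars.splitOn s sep = pysplit sep hsep s := by
  have hne := pysplit_ne_nil sep hsep s
  rw [PySem.Chars.splitOn, splitOn_go_eq sep hsep (s.length + 1) s (by omega)]
  cases hd : pysplit sep hsep s with
  | nil => exact absurd hd hne
  | cons p ps => simp

theorem altGo_eq (sep : List Char) (hsep : sep ≠ []) :
    ∀ (s cur : List Char) (out : List (List Char)),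
      altGo sep hsep s cur out =
        out ++ (cur ++ (pysplit sep hsep s).headI) ::
          (pysplit sep hsep s).tail.map (fun p => sep ++ p) := by
  intro s cur out
  fun_induction altGo sep hsep s cur out with
  | case1 cur out => simp [pysplit]
  | case2 cur out c rest hpre ih =>
    rw [pysplit]
    simp only [hpre, if_true]
    have hne := pysplit_ne_nil sep hsep (List.drop sep.length (c :: rest))
    cases hd : pysplit sep hsep (List.drop sep.length (c :: rest)) with
    | nil => exact absurd hd hne
    | cons p ps => rw [ih]; simp [hd]
  | case3 cur out c rest hpre ih =>
    rw [pysplit]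
    simp only [hpre]
    have hne := pysplit_ne_nil sep hsep rest
    cases hd : pysplit sep hsep rest with
    | nil => exact absurd hd hne
    | cons p ps => rw [ih]; simp [hd]

theorem ofList_append (s : String) (p : List Char) :
    s ++ String.ofList p = String.ofList (s.toList ++ p) :=
  String.toList_inj.mp (by simp)

-- A's inner indexed loop over isplit, as a map over the reference split
theorem item_eq (sep : String) (hsep : sep.toList ≠ []) (item : String) (newList : List String) :
    (let isplit : List String := (PySem.Chars.splitOn item.toList sep.toList).map String.ofList
     (PySem.List.pyRange 0 isplit.length 1).foldl (fun acc i =>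
       let toAdd := PySem.List.pyGetD isplit i ""
       let toAdd := if 0 < i then sep ++ toAdd else toAdd
       acc ++ [toAdd]) newList) =
    newList ++ ((pysplit sep.toList hsep item.toList).headI ::
      (pysplit sep.toList hsep item.toList).tail.map (fun p => sep.toList ++ p)).map String.ofList := by
  simp only [splitOn_eq_pysplit sep.toList hsep]
  have hne := pysplit_ne_nil sep.toList hsep item.toList
  cases hd : pysplit sep.toList hsep item.toList with
  | nil => exact absurd hd hne
  | cons p ps =>
    rw [PySem.List.foldl_append_singleton_eq_map]
    have hn : (0 : Int) < ((List.map String.ofList (p :: ps)).length : Int) := by simp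
    rw [PySem.List.pyRange_one_cons hn, List.map_cons]
    rw [List.map_congr_left
        (g := fun i => sep ++ PySem.List.pyGetD (List.map String.ofList (p :: ps)) i "")
        (fun i hi => by
          have := PySem.List.mem_pyRange_one.mp hi
          simp only [if_pos (by omega : (0:Int) < i)])]
    have comp : (fun i => sep ++ PySem.List.pyGetD (List.map String.ofList (p :: ps)) i "") =
        (fun q => sep ++ q) ∘ (fun i => PySem.List.pyGetD (List.map String.ofList (p :: ps)) i "") := rfl
    rw [comp, ← List.map_map, (by norm_num : (0:Int) + 1 = 1),
      PySem.List.map_pyGetD_pyRange' (List.map String.ofList (p :: ps)) "" (by omega : (0:Int) ≤ 1)]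
    rw [if_neg (by omega : ¬ (0:Int) < 0)]
    simp only [PySem.List.pyGetD_zero_cons, Int.toNat_one, List.drop_succ_cons, List.drop_zero,
      List.map_map, List.map_cons, List.headI, List.tail]
    congr 1
    congr 1
    exact List.map_congr_left (fun q _ => ofList_append sep q)

theorem fold_eq (sep : String) (hsep : sep.toList ≠ []) :
    ∀ (l : List String) (accC : List (List Char)),
      l.foldl (fun newList item =>
        let isplit : List String := (PySem.Chars.splitOn item.toList sep.toList).map String.ofList
        (PySem.List.pyRange 0 isplit.length 1).foldl (fun acc i =>
          let toAdd := PySem.List.pyGetD isplit i ""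
          let toAdd := if 0 < i then sep ++ toAdd else toAdd
          acc ++ [toAdd]) newList) (accC.map String.ofList) =
      (l.foldl (fun out item => altGo sep.toList hsep item.toList [] out) accC).map String.ofList := by
  intro l
  induction l with
  | nil => intro accC; rfl
  | cons item t ih =>
    intro accC
    simp only [List.foldl_cons]
    rw [item_eq sep hsep item, altGo_eq sep.toList hsep item.toList [] accC, ← ih]
    simp

-- ===== VERDICT (by name: the statement is the Claim_ definition above) =====
theorem splitListOn_spec : Claim_equal_splitListOn := by
  intro l sep _ hpre
  have hsep : sep.toList ≠ [] := by
    intro h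
    exact hpre (String.toList_inj.mp (by simp [h]))
  unfold Spec_splitListOn splitListOn splitListOn_alt
  rw [dif_neg hsep]
  have := fold_eq sep hsep l []
  simpa using this
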